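-- pv_equiv track=rewrite | github.com/yaqiliu-cs/SelfDM-TIP | proposals_utils.py | fixsize
-- ===== SOURCE A (Python) =====
-- import copy
--
-- def fixsize(boxes,maxsize,minsize):
--     final_size = copy.deepcopy(minsize)
--     for i in range(len(boxes)):
--         w = boxes[i][0][2]-boxes[i][0][0]
--         h = boxes[i][0][3]-boxes[i][0][1]
--         if w > final_size[0] and w < maxsize[0]:
--             final_size[0] = w
--         if h > final_size[1] and h < maxsize[1]:
--             final_size[1] = h
--
--         if w >= maxsize[0]:
--             final_size[0] = maxsize[0]
--         if h >= maxsize[1]: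
--             final_size[1] = maxsize[1]
--
--     return final_size
-- ===== SOURCE B (Python) =====
-- def fixsize(boxes, maxsize, minsize):
--     widths = [b[0][2] - b[0][0] for b in boxes]
--     heights = [b[0][3] - b[0][1] for b in boxes]
--     out = list(minsize)
--     if boxes:
--         out[0] = maxsize[0] if any(w >= maxsize[0] for w in widths) else max([minsize[0]] + widths)
--         out[1] = maxsize[1] if any(h >= maxsize[1] for h in heights) else max([minsize[1]] + heights)
--     return out
-- ===== Notes on version B (the rewrite author's own statement) =====
-- stated objective: simpler
-- what changed: Replaced A's sequential loop that stickily mutates a copy of minsize with an extract-then-reduce decomposition: build width and height lists once, then compute each output dimension independently (maxsize[k] if any value reaches it, else the max of minsize[k] and the values).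
import Mathlib
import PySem

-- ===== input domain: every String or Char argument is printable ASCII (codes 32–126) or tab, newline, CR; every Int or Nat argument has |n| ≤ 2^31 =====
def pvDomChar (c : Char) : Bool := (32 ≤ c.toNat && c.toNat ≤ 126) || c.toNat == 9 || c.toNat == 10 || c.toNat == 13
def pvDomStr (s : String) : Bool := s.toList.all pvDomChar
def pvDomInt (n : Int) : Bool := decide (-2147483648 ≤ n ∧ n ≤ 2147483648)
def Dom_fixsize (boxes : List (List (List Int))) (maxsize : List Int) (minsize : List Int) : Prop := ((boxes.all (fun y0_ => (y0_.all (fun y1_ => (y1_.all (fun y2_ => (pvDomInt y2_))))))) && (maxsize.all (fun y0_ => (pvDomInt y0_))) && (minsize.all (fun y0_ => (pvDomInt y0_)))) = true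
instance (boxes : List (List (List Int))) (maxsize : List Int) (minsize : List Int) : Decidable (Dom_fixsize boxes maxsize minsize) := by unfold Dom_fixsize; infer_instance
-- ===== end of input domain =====

-- B replaces A's sequential sticky-update loop by an extract-then-reduce decomposition
-- (width/height lists, then each output dimension computed independently): simpler, same cost.

-- ===== PORT A =====
-- literal transliteration of A: loop over range(len(boxes)), conditional in-place updates of final_size.
-- Python's list-item read/assignment at the literal nonnegative indices 0/1 is exact as pyGetD / List.set here.
-- the body of one loop iteration of A, named so the fold is readable
def fixsizeStepA (maxsize : List Int) (fs : List Int) (b : List (List Int)) : List Int :=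
  let w := PySem.List.pyGetD (PySem.List.pyGetD b 0 []) 2 0 - PySem.List.pyGetD (PySem.List.pyGetD b 0 []) 0 0
  let h := PySem.List.pyGetD (PySem.List.pyGetD b 0 []) 3 0 - PySem.List.pyGetD (PySem.List.pyGetD b 0 []) 1 0
  let fs := if PySem.List.pyGetD fs 0 0 < w ∧ w < PySem.List.pyGetD maxsize 0 0 then fs.set 0 w else fs
  let fs := if PySem.List.pyGetD fs 1 0 < h ∧ h < PySem.List.pyGetD maxsize 1 0 then fs.set 1 h else fs
  let fs := if PySem.List.pyGetD maxsize 0 0 ≤ w then fs.set 0 (PySem.List.pyGetD maxsize 0 0) else fs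
  let fs := if PySem.List.pyGetD maxsize 1 0 ≤ h then fs.set 1 (PySem.List.pyGetD maxsize 1 0) else fs
  fs

def fixsize (boxes : List (List (List Int))) (maxsize : List Int) (minsize : List Int) : List Int :=
  (PySem.List.pyRange 0 (boxes.length : Int) 1).foldl
    (fun fs i => fixsizeStepA maxsize fs (PySem.List.pyGetD boxes i []))
    minsize

-- ===== PORT B =====
-- literal transliteration of Source B: comprehensions for widths/heights, then each dimension
-- via any(...) / max([minsize[k]] + list) (Python max of a nonempty list = PySem.List.max?).
def fixsize_alt (boxes : List (List (List Int))) (maxsize : List Int) (minsize : List Int) : List Int :=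
  let widths := boxes.map (fun b => PySem.List.pyGetD (PySem.List.pyGetD b 0 []) 2 0 - PySem.List.pyGetD (PySem.List.pyGetD b 0 []) 0 0)
  let heights := boxes.map (fun b => PySem.List.pyGetD (PySem.List.pyGetD b 0 []) 3 0 - PySem.List.pyGetD (PySem.List.pyGetD b 0 []) 1 0)
  let out := minsize
  if boxes.isEmpty then out
  else
    let o0 := if widths.any (fun w => decide (PySem.List.pyGetD maxsize 0 0 ≤ w))
              then PySem.List.pyGetD maxsize 0 0
              else (PySem.List.max? (PySem.List.pyGetD minsize 0 0 :: widths) (fun y => y)).getD 0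
    let o1 := if heights.any (fun h => decide (PySem.List.pyGetD maxsize 1 0 ≤ h))
              then PySem.List.pyGetD maxsize 1 0
              else (PySem.List.max? (PySem.List.pyGetD minsize 1 0 :: heights) (fun y => y)).getD 0
    (out.set 0 o0).set 1 o1

-- ===== PRECONDITION & SPEC =====
-- Exactly the inputs on which A returns (raises IndexError otherwise): either no boxes,
-- or minsize/maxsize have at least two entries and every box has a first element of length ≥ 4.
def Pre_fixsize (boxes : List (List (List Int))) (maxsize : List Int) (minsize : List Int) : Prop :=
  boxes = [] ∨ (2 ≤ minsize.length ∧ 2 ≤ maxsize.length ∧ ∀ b ∈ boxes, 4 ≤ b.headI.length)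
instance (boxes : List (List (List Int))) (maxsize : List Int) (minsize : List Int) : Decidable (Pre_fixsize boxes maxsize minsize) := by unfold Pre_fixsize; infer_instance
def pvWitness_fixsize : List (List (List Int)) × List Int × List Int := ([[[0, 0, 5, 4]]], [10, 10], [2, 3])

def Spec_fixsize (boxes : List (List (List Int))) (maxsize : List Int) (minsize : List Int) (out : List Int) : Prop := out = fixsize_alt boxes maxsize minsize
instance (boxes : List (List (List Int))) (maxsize : List Int) (minsize : List Int) (out : List Int) : Decidable (Spec_fixsize boxes maxsize minsize out) := by unfold Spec_fixsize; infer_instance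

-- ===== CLAIM (what is proved, stated in full; the proofs are below) =====
def Claim_equal_fixsize : Prop := ∀ (boxes : List (List (List Int))) (maxsize : List Int) (minsize : List Int), Dom_fixsize boxes maxsize minsize → Pre_fixsize boxes maxsize minsize → Spec_fixsize boxes maxsize minsize (fixsize boxes maxsize minsize)

-- ===== LEMMAS AND PROOFS =====

-- width/height of a box, as both ports compute it
def wOf (b : List (List Int)) : Int :=
  PySem.List.pyGetD (PySem.List.pyGetD b 0 []) 2 0 - PySem.List.pyGetD (PySem.List.pyGetD b 0 []) 0 0
def hOf (b : List (List Int)) : Int :=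
  PySem.List.pyGetD (PySem.List.pyGetD b 0 []) 3 0 - PySem.List.pyGetD (PySem.List.pyGetD b 0 []) 1 0

-- one iteration of A's loop, per coordinate
def aStep (mx f v : Int) : Int := if mx ≤ v then mx else max f v

lemma stepA_cons (maxsize : List Int) (f0 f1 : Int) (rest : List Int) (b : List (List Int)) :
    fixsizeStepA maxsize (f0 :: f1 :: rest) b
      = aStep (PySem.List.pyGetD maxsize 0 0) f0 (wOf b)
        :: aStep (PySem.List.pyGetD maxsize 1 0) f1 (hOf b) :: rest := by
  simp only [fixsizeStepA, aStep, wOf, hOf]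
  split_ifs <;>
    simp_all [PySem.List.pyGetD_ofNat', max_def] <;>
    omega

lemma foldA (maxsize : List Int) (bs : List (List (List Int))) :
    ∀ (f0 f1 : Int) (rest : List Int),
    bs.foldl (fixsizeStepA maxsize) (f0 :: f1 :: rest)
      = (bs.map wOf).foldl (aStep (PySem.List.pyGetD maxsize 0 0)) f0
        :: (bs.map hOf).foldl (aStep (PySem.List.pyGetD maxsize 1 0)) f1 :: rest := by
  induction bs with
  | nil => intro f0 f1 rest; simp
  | cons b t ih =>
    intro f0 f1 rest
    rw [List.foldl_cons, stepA_cons, List.map_cons, List.map_cons,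
      List.foldl_cons, List.foldl_cons]
    exact ih _ _ _

lemma foldl_aStep_top (mx : Int) (vs : List Int) : vs.foldl (aStep mx) mx = mx := by
  induction vs with
  | nil => rfl
  | cons v t ih =>
    simp only [List.foldl_cons, aStep]
    split_ifs with h
    · exact ih
    · rw [max_eq_left (by omega)]; exact ih

lemma foldl_aStep_eq (mx : Int) (vs : List Int) :
    ∀ f, vs.foldl (aStep mx) f
      = if vs.any (fun v => decide (mx ≤ v)) then mx else vs.foldl max f := by
  induction vs with
  | nil => intro f; simp
  | cons v t ih =>
    intro f
    simp only [List.foldl_cons, List.any_cons, aStep]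
    by_cases h : mx ≤ v
    · simp [h, foldl_aStep_top]
    · simp [h, ih]

lemma map_wOf (t : List (List (List Int))) :
    List.map wOf t = t.map (fun b => (b[0]?.getD ([] : List Int))[2]?.getD 0 - (b[0]?.getD ([] : List Int))[0]?.getD 0) := by
  apply List.map_congr_left; intro x _; simp [wOf, PySem.List.pyGetD_ofNat']

lemma map_hOf (t : List (List (List Int))) :
    List.map hOf t = t.map (fun b => (b[0]?.getD ([] : List Int))[3]?.getD 0 - (b[0]?.getD ([] : List Int))[1]?.getD 0) := by
  apply List.map_congr_left; intro x _; simp [hOf, PySem.List.pyGetD_ofNat']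

-- ===== VERDICT (by name: the statement is the Claim_ definition above) =====
theorem fixsize_spec : Claim_equal_fixsize := by
  intro boxes maxsize minsize _ hpre
  unfold Spec_fixsize
  rcases hpre with hb | ⟨hmn, _, _⟩
  · subst hb
    simp [fixsize, fixsize_alt, PySem.List.pyRange_one_eq_nil]
  · rcases boxes with _ | ⟨b, t⟩
    · simp [fixsize, fixsize_alt, PySem.List.pyRange_one_eq_nil]
    rcases minsize with _ | ⟨m0, ms⟩
    · simp at hmn
    rcases ms with _ | ⟨m1, rest⟩
    · simp at hmn
    have hA : fixsize (b :: t) maxsize (m0 :: m1 :: rest)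
        = ((b :: t).map wOf).foldl (aStep (PySem.List.pyGetD maxsize 0 0)) m0
          :: ((b :: t).map hOf).foldl (aStep (PySem.List.pyGetD maxsize 1 0)) m1 :: rest := by
      unfold fixsize
      rw [PySem.List.foldl_pyRange_zero_pyGetD' (b :: t) ([] : List (List Int))
        (fixsizeStepA maxsize) (m0 :: m1 :: rest)]
      exact foldA maxsize (b :: t) m0 m1 rest
    rw [hA]
    simp only [fixsize_alt, List.isEmpty_cons, Bool.false_eq_true, if_false,
      PySem.List.pyGetD_ofNat', List.getD_cons_succ,
      List.getD_cons_zero, PySem.List.max?_id_cons, Option.getD_some]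
    rw [foldl_aStep_eq, foldl_aStep_eq]
    simp [wOf, hOf, PySem.List.pyGetD_ofNat', map_wOf, map_hOf]
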